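-- pv_equiv track=rewrite | github.com/weka511/bioinformatics | rosalind.py | grph_kmers
-- ===== SOURCE A (Python) =====
-- def grph_kmers(strings):
--     kk=len(strings[0])-1
--     graph=[]
--     for s in strings:
--         for t in strings:
--             if s!=t and s[-kk:]==t[:kk]:
--                 graph.append((s,t))
--
--     return graph
-- ===== SOURCE B (Python) =====
-- def grph_kmers(strings):
--     kk = len(strings[0]) - 1
--     items = [(t[:kk], t) for t in strings]
--     index = {}
--     for key, t in items:
--         index.setdefault(key, []).append(t)
--     graph = []
--     for s in strings:
--         for t in index.get(s[-kk:], []):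
--             if t != s:
--                 graph.append((s, t))
--     return graph
-- ===== Notes on version B (the rewrite author's own statement) =====
-- stated objective: faster
-- what changed: B builds a dict mapping each (k-1)-prefix to the list of strings with that prefix, then looks each string's suffix up once, replacing A's nested all-pairs scan; the nested loop over all pairs disappears.
import Mathlib
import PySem

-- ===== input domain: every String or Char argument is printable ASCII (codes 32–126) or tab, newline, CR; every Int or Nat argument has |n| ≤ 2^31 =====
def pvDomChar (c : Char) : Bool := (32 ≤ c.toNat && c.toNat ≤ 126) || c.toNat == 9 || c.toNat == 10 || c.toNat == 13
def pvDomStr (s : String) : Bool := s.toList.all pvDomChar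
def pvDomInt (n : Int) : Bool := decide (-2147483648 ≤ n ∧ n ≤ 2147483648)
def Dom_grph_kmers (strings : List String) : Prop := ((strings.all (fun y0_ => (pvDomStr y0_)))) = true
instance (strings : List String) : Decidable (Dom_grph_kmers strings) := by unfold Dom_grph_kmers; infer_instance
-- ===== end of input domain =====

-- B replaces A's all-pairs nested scan by a dict from (k-1)-prefix to the strings carrying it,
-- looked up once per suffix (objective: faster; asymptotic, O(n^2*k) -> O(n*k + edges)).


-- ===== PORT A =====
-- kk = len(strings[0]) - 1; strings[0] raises IndexError on [], excluded by Pre_ (getD "" is unreachable there)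
def grph_kmers (strings : List String) : List (String × String) :=
  let kk : Int := PySem.Str.len ((PySem.List.pyGet? strings 0).getD "") - 1
  strings.foldl (fun graph s =>
    strings.foldl (fun graph t =>
      if s != t && (PySem.Str.slice s (some (-kk)) none == PySem.Str.slice t none (some kk))
      then graph ++ [(s, t)] else graph) graph) []

-- ===== PORT B =====
def grph_kmers_alt (strings : List String) : List (String × String) :=
  let kk : Int := PySem.Str.len ((PySem.List.pyGet? strings 0).getD "") - 1
  let items := strings.map (fun t => (PySem.Str.slice t none (some kk), t))
  let index := items.foldl (fun d p => d.modify p.1 [] (· ++ [p.2])) PySem.Dict.empty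
  strings.foldl (fun graph s =>
    (index.getD (PySem.Str.slice s (some (-kk)) none) []).foldl (fun graph t =>
      if t != s then graph ++ [(s, t)] else graph) graph) []

-- ===== PRECONDITION & SPEC =====
-- A evaluates strings[0], which raises IndexError on the empty list; Pre_ excludes exactly that.
def Pre_grph_kmers (strings : List String) : Prop := strings ≠ []
instance (strings : List String) : Decidable (Pre_grph_kmers strings) := by unfold Pre_grph_kmers; infer_instance
def pvWitness_grph_kmers : List String := ["ab", "bc", "ca"]

def Spec_grph_kmers (strings : List String) (out : List (String × String)) : Prop := out = grph_kmers_alt strings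
instance (strings : List String) (out : List (String × String)) : Decidable (Spec_grph_kmers strings out) := by unfold Spec_grph_kmers; infer_instance

-- ===== CLAIM (what is proved, stated in full; the proofs are below) =====
def Claim_equal_grph_kmers : Prop := ∀ (strings : List String), Dom_grph_kmers strings → Pre_grph_kmers strings → Spec_grph_kmers strings (grph_kmers strings)

-- ===== LEMMAS AND PROOFS =====

-- the dict group for key c is exactly the strings whose prefix is c
theorem pv_index_getD (strings : List String) (pref : String → String) (c : String) :
    (((strings.map (fun t => (pref t, t))).foldl
        (fun d p => d.modify p.1 [] (· ++ [p.2])) PySem.Dict.empty).getD c []) =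
      strings.filter (fun t => pref t == c) := by
  rw [PySem.Dict.getD_foldl_modify_append]
  simp [List.filter_map, Function.comp_def]

-- B's inner loop over the group equals A's inner loop over all strings
theorem pv_inner (strings : List String) (pref suf : String → String) (s : String)
    (graph : List (String × String)) :
    ((strings.filter (fun t => pref t == suf s)).foldl
        (fun graph t => if t != s then graph ++ [(s, t)] else graph) graph) =
      strings.foldl (fun graph t =>
        if s != t && (suf s == pref t) then graph ++ [(s, t)] else graph) graph := by
  rw [PySem.List.foldl_append_if, PySem.List.foldl_append_if, List.filter_filter]
  congr 2
  apply List.filter_congr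
  intro t _
  simp [bne, Bool.beq_comm]

theorem pv_main : ∀ (strings : List String), Pre_grph_kmers strings →
    grph_kmers strings = grph_kmers_alt strings := by
  intro strings _
  unfold grph_kmers grph_kmers_alt
  generalize (PySem.Str.len ((PySem.List.pyGet? strings 0).getD "") - 1) = kk
  apply Eq.symm
  apply PySem.List.foldl_congr_mem
  intro graph s _
  rw [pv_index_getD]
  exact pv_inner strings (fun t => PySem.Str.slice t none (some kk))
    (fun s => PySem.Str.slice s (some (-kk)) none) s graph

-- ===== VERDICT (by name: the statement is the Claim_ definition above) =====
theorem grph_kmers_spec : Claim_equal_grph_kmers := by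
  intro strings _ hpre
  unfold Spec_grph_kmers
  exact pv_main strings hpre
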